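-- pv_equiv track=rewrite | github.com/Infinitoo666/qr-code-generator | genQR.py | encode_text_to_bits
-- ===== SOURCE A (Python) =====
-- def add_alignment_patterns(tab,reserved, version) -> None:
--     if version == 1:
--         return
--     size = len(tab)
--     all_cords = [[],[],[6,18],[6,22],[6,26]]
--     cords = all_cords[version]
--     potential_centers = []
--     for i in range(len(cords)):
--         for j in range(len(cords)):
--             potential_centers.append([cords[i],cords[j]])
--     valid_cords = []
--     for x,y in potential_centers:
--         if x <= 7 and y <= 7:
--             continue
--         elif x <= 7 and y >= size - 8:
--             continue
--         elif x >= size - 8 and y <= 7: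
--             continue
--         valid_cords.append([x,y])
--
--     for x,y in valid_cords:
--         tab[x][y] = 1
--         for i in range(5):
--             tab[x-2+i][y-2] = 1 # left side
--             tab[x-2+i][y+2] = 1 # right side
--             tab[x-2][y-2+i] = 1 # up
--             tab[x+2][y-2+i] = 1 # down
--             for j in range(5):
--                 reserved[x-2+i][y-2+j] = 1
--
-- def create_reserved_matrix(size) -> list:
--     reserved = [[0 for _ in range(size)] for _ in range(size)]
--     temp = 0 # temp is used to skip intersection when index is 6
--     for i in range(8):
--         reserved[8][size-8+i] = 3 # top-right format info area
--         reserved[size-8+i][8] = 3 # bottom-left format info area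
--         if i == 6:
--             temp = 1
--         reserved[8][i+temp] = 3 # top-left format info (horizontal)
--         reserved[temp+i][8] = 3 # top-left format info (vertical)
--         for j in range(8):
--             reserved[i][j] = 1 # top-left finder pattern
--             reserved[i][j+size-8] = 1  # top-right finder pattern
--             reserved[i+size-8][j] = 1 # bottom-left finder pattern
--
--     for k in range(size-16):
--         reserved[8+k][6] = 2 # vertical timing pattern
--         reserved[6][8+k] = 2 # horizontal timing pattern
--     reserved[size-8][8] = 1
--     return reserved
--
-- def encode_text_to_bits(text) -> tuple:
--     bits = "0100"
--     char_count = len(text)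
--     bits += f"{char_count:08b}"
--     for char in text:
--         bits += f"{ord(char):08b}" # convert char to bits
--
--     bits += "0000"
--     while len(bits) % 8 != 0:
--         bits += "0"
--     size, version, total_capacity = find_version_and_capacity(bits)
--     ec_bytes = [0,7,10,15,18]
--     total_bits = (total_capacity//8) * 8
--     bits_limit = total_bits - ec_bytes[version] * 8
--     remaining_bits = bits_limit - len(bits)
--     padding = ["11101100", "00010001"]
--     i = 0
--     while remaining_bits >= 8:
--         bits += padding[i]
--         i += 1
--         i %= 2
--         remaining_bits -= 8
--     if remaining_bits > 0:
--         bits += padding[i][:remaining_bits]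
--     return bits, size, version
--
-- def find_version_and_capacity(bits) -> tuple:
--     char_count = len(bits)
--     ec_bytes = [7,10,15,18]
--
--     size = 21
--     version = 0
--     while True:
--         ec_bits = ec_bytes[version] * 8
--         test_matrix = [[0 for _ in range(size)] for _ in range(size)]
--         test_reserved = create_reserved_matrix(size)
--
--         add_alignment_patterns(test_matrix,test_reserved,version+1)
--         free_modules = 0
--         for row in test_reserved:
--             free_modules += row.count(0)
--         max_capacity = (free_modules//8)*8
--         if max_capacity >= char_count + ec_bits:
--             return size, version+1, free_modules
--         size += 4
--         version += 1
-- ===== SOURCE B (Python) =====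
-- # Version capacity table: (version, size, free_modules, ec_bytes),
-- # free_modules precomputed instead of rebuilding the reserved matrix each time.
-- _TABLE = [(1, 21, 208, 7), (2, 25, 359, 10), (3, 29, 567, 15), (4, 33, 807, 18)]
--
--
-- def encode_text_to_bits(text) -> tuple:
--     body = "0100" + format(len(text), "08b") + "".join(format(ord(c), "08b") for c in text) + "0000"
--     bits = body + "0" * (-len(body) % 8)
--     version, size, free_modules, ec = next(
--         (v, s, fm, e) for v, s, fm, e in _TABLE
--         if (fm // 8) * 8 - e * 8 >= len(bits)
--     )
--     rem = (free_modules // 8) * 8 - ec * 8 - len(bits)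
--     bits += ("1110110000010001" * (rem // 16 + 1))[:rem]
--     return bits, size, version
-- ===== Notes on version B (the rewrite author's own statement) =====
-- stated objective: faster
-- what changed: B replaces find_version_and_capacity's per-version construction and scan of whole reserved matrices with a four-entry precomputed capacity table, builds the bitstring by a single join instead of repeated += loops, and emits the byte padding as one sliced repetition of the 16-bit pattern instead of an alternating-index while loop.
import Mathlib
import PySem

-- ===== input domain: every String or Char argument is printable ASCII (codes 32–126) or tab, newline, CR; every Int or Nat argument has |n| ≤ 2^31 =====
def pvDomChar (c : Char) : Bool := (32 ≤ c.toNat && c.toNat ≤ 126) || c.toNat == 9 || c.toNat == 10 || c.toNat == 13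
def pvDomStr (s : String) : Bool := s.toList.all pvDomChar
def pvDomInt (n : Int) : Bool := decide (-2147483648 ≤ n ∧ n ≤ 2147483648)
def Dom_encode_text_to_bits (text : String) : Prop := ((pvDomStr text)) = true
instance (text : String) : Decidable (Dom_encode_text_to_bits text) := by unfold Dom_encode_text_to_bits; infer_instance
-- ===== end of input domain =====

-- B replaces the per-version reserved-matrix construction with a precomputed capacity
-- table, a single join for the char bits and a sliced repetition for the padding;
-- timing objective per claim.json.

-- ===== PORT A =====

-- f"{m:08b}": 8 binary digits, MSB first; exact for 0 ≤ m < 256 (all uses here, under Pre_/Dom).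
def pvBin8 (m : Nat) : List Char :=
  (List.range 8).map (fun k => if m / 2 ^ (7 - k) % 2 = 1 then '1' else '0')

-- tab[i][j] = v; exact here: every written index is in range and nonnegative.
def pvSet2 (m : List (List Int)) (i j : Nat) (v : Int) : List (List Int) :=
  m.set i ((m.getD i []).set j v)

-- create_reserved_matrix, step for step (all indices nonnegative and in range: 8 ≤ size-8).
def create_reserved_matrix (size : Nat) : List (List Int) :=
  let reserved := (List.range size).map (fun _ => (List.range size).map (fun _ => (0 : Int)))
  let st := (List.range 8).foldl (fun (st : List (List Int) × Nat) i =>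
    let r := st.1
    let temp := st.2
    let r := pvSet2 r 8 (size - 8 + i) 3
    let r := pvSet2 r (size - 8 + i) 8 3
    let temp := if i = 6 then 1 else temp
    let r := pvSet2 r 8 (i + temp) 3
    let r := pvSet2 r (temp + i) 8 3
    let r := (List.range 8).foldl (fun r j =>
      let r := pvSet2 r i j 1
      let r := pvSet2 r i (j + size - 8) 1
      pvSet2 r (i + size - 8) j 1) r
    (r, temp)) (reserved, 0)
  let reserved := (List.range (size - 16)).foldl (fun r k =>
    let r := pvSet2 r (8 + k) 6 2
    pvSet2 r 6 (8 + k) 2) st.1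
  pvSet2 reserved (size - 8) 8 1

-- add_alignment_patterns, step for step (coordinates are ≥ 6, so x-2+i etc. stay in range).
def add_alignment_patterns (tab reserved : List (List Int)) (version : Nat) :
    List (List Int) × List (List Int) :=
  if version = 1 then (tab, reserved) else
  let size := tab.length
  let all_cords : List (List Nat) := [[], [], [6, 18], [6, 22], [6, 26]]
  let cords := all_cords.getD version []
  let potential_centers := cords.foldl (fun acc x => acc ++ cords.map (fun y => (x, y))) []
  let valid_cords := potential_centers.foldl (fun acc (p : Nat × Nat) =>
    if p.1 ≤ 7 ∧ p.2 ≤ 7 then acc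
    else if p.1 ≤ 7 ∧ p.2 ≥ size - 8 then acc
    else if p.1 ≥ size - 8 ∧ p.2 ≤ 7 then acc
    else acc ++ [p]) []
  valid_cords.foldl (fun (st : List (List Int) × List (List Int)) p =>
    let x := p.1
    let y := p.2
    let tab := pvSet2 st.1 x y 1
    (List.range 5).foldl (fun (st2 : List (List Int) × List (List Int)) i =>
      let tab := pvSet2 st2.1 (x - 2 + i) (y - 2) 1
      let tab := pvSet2 tab (x - 2 + i) (y + 2) 1
      let tab := pvSet2 tab (x - 2) (y - 2 + i) 1
      let tab := pvSet2 tab (x + 2) (y - 2 + i) 1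
      let reserved := (List.range 5).foldl (fun r j => pvSet2 r (x - 2 + i) (y - 2 + j) 1) st2.2
      (tab, reserved)) (tab, st.2)) (tab, reserved)

-- one iteration's free-module count of find_version_and_capacity's loop body
def pvFvFree (size version : Nat) : Nat :=
  let test_matrix := (List.range size).map (fun _ => (List.range size).map (fun _ => (0 : Int)))
  let test_reserved := create_reserved_matrix size
  let st := add_alignment_patterns test_matrix test_reserved (version + 1)
  st.2.foldl (fun acc row => acc + row.count 0) 0

-- the 'while True' loop: ec_bytes[version] raises IndexError at version = 4 → none
def pvFvLoop (char_count size version : Nat) : Option (Nat × Nat × Nat) :=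
  if h : version < 4 then
    let ec_bits := ([7, 10, 15, 18].getD version 0) * 8
    let free_modules := pvFvFree size version
    let max_capacity := free_modules / 8 * 8
    if max_capacity ≥ char_count + ec_bits then some (size, version + 1, free_modules)
    else pvFvLoop char_count (size + 4) (version + 1)
  else none
termination_by 4 - version

def find_version_and_capacity (bits : List Char) : Option (Nat × Nat × Nat) :=
  pvFvLoop bits.length 21 0

-- while len(bits) % 8 != 0: bits += "0"
def pvPadAlign (bits : List Char) : List Char :=
  if bits.length % 8 ≠ 0 then pvPadAlign (bits ++ ['0']) else bits
termination_by (8 - bits.length % 8) % 8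
decreasing_by simp_all; omega

-- while remaining_bits >= 8: bits += padding[i]; i = (i+1)%2; remaining -= 8
def pvPadLoop (bits : List Char) (i : Nat) (remaining : Int) : List Char × Nat × Int :=
  if remaining ≥ 8 then
    pvPadLoop (bits ++ (["11101100".toList, "00010001".toList].getD i [])) ((i + 1) % 2)
      (remaining - 8)
  else (bits, i, remaining)
termination_by remaining.toNat
decreasing_by simp; omega

def encode_text_to_bits (text : String) : String × Int × Int :=
  let char_count := text.toList.length
  let bits := "0100".toList ++ pvBin8 char_count
  let bits := text.toList.foldl (fun b c => b ++ pvBin8 c.toNat) bits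
  let bits := bits ++ "0000".toList
  let bits := pvPadAlign bits
  match find_version_and_capacity bits with
  | none => ("", 0, 0)  -- Python raises IndexError here; excluded by Pre_
  | some (size, version, total_capacity) =>
    let ec_bytes := [0, 7, 10, 15, 18]
    let total_bits := total_capacity / 8 * 8
    let bits_limit := (total_bits : Int) - (ec_bytes.getD version 0 : Nat) * 8
    let st := pvPadLoop bits 0 (bits_limit - bits.length)
    let bits := st.1
    let bits := if st.2.2 > 0 then bits ++ (["11101100".toList, "00010001".toList].getD st.2.1 []).take st.2.2.toNat else bits
    (String.ofList bits, (size : Int), (version : Int))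

-- ===== PORT B =====

-- (version, size, free_modules, ec_bytes): precomputed table
def pvTable : List (Nat × Nat × Nat × Nat) :=
  [(1, 21, 208, 7), (2, 25, 359, 10), (3, 29, 567, 15), (4, 33, 807, 18)]

def encode_text_to_bits_alt (text : String) : String × Int × Int :=
  let body := "0100".toList ++ pvBin8 text.toList.length
      ++ (text.toList.map (fun c => pvBin8 c.toNat)).flatten ++ "0000".toList
  let bits := body ++ List.replicate ((8 - body.length % 8) % 8) '0'
  match pvTable.find? (fun e => e.2.2.1 / 8 * 8 - e.2.2.2 * 8 ≥ bits.length) with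
  | none => ("", 0, 0)  -- Python raises StopIteration here; excluded by Pre_
  | some (version, size, free_modules, ec) =>
    let rem := free_modules / 8 * 8 - ec * 8 - bits.length
    let bits := bits ++ ((List.replicate (rem / 16 + 1) "1110110000010001".toList).flatten).take rem
    (String.ofList bits, (size : Int), (version : Int))

-- ===== PRECONDITION & SPEC =====
-- Pre_ excludes texts longer than 80 characters, on which A raises IndexError (and B StopIteration).
def Pre_encode_text_to_bits (text : String) : Prop := text.toList.length ≤ 80
instance (text : String) : Decidable (Pre_encode_text_to_bits text) := by
  unfold Pre_encode_text_to_bits; infer_instance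

def pvWitness_encode_text_to_bits : String := "hi"

def Spec_encode_text_to_bits (text : String) (out : String × Int × Int) : Prop := out = encode_text_to_bits_alt text
instance (text : String) (out : String × Int × Int) : Decidable (Spec_encode_text_to_bits text out) := by unfold Spec_encode_text_to_bits; infer_instance

-- ===== CLAIM (what is proved, stated in full; the proofs are below) =====
def Claim_equal_encode_text_to_bits : Prop := ∀ (text : String), Dom_encode_text_to_bits text → Pre_encode_text_to_bits text → Spec_encode_text_to_bits text (encode_text_to_bits text)

-- ===== LEMMAS AND PROOFS =====

theorem pvBin8_length (m : Nat) : (pvBin8 m).length = 8 := by simp [pvBin8]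

theorem flatten_bin8_length (cs : List Char) :
    ((cs.map (fun c => pvBin8 c.toNat)).flatten).length = 8 * cs.length := by
  induction cs with
  | nil => simp
  | cons c cs ih => simp [ih, pvBin8_length]; ring

theorem padAlign_id (l : List Char) (h : l.length % 8 = 0) : pvPadAlign l = l := by
  unfold pvPadAlign; simp [h]

set_option maxRecDepth 400000 in
theorem fvFree_21 : pvFvFree 21 0 = 208 := by decide
set_option maxRecDepth 400000 in
theorem fvFree_25 : pvFvFree 25 1 = 359 := by decide
set_option maxRecDepth 400000 in
theorem fvFree_29 : pvFvFree 29 2 = 567 := by decide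
set_option maxRecDepth 400000 in
theorem fvFree_33 : pvFvFree 33 3 = 807 := by decide

theorem fvLoop_eq (L : Nat) :
    pvFvLoop L 21 0 =
      if L + 56 ≤ 208 then some (21, 1, 208)
      else if L + 80 ≤ 352 then some (25, 2, 359)
      else if L + 120 ≤ 560 then some (29, 3, 567)
      else if L + 144 ≤ 800 then some (33, 4, 807) else none := by
  unfold pvFvLoop pvFvLoop pvFvLoop pvFvLoop pvFvLoop
  norm_num [fvFree_21, fvFree_25, fvFree_29, fvFree_33]

-- alternating padding sequence, proof-only helper
def pvPadSeq : Nat → Nat → List Char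
  | _, 0 => []
  | i, k + 1 => (["11101100".toList, "00010001".toList].getD i []) ++ pvPadSeq ((i + 1) % 2) k

theorem padLoop_eq (k : Nat) : ∀ (b : List Char) (i : Nat), i < 2 →
    pvPadLoop b i (8 * (k : Int)) = (b ++ pvPadSeq i k, (i + k) % 2, 0) := by
  induction k with
  | zero => intro b i hi; unfold pvPadLoop; simp [pvPadSeq]; omega
  | succ k ih =>
    intro b i hi
    unfold pvPadLoop
    rw [if_pos (by push_cast; omega)]
    have h8 : (8 : Int) * ((k : Nat) + 1) - 8 = 8 * (k : Int) := by ring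
    push_cast
    rw [h8, ih _ _ (by omega)]
    simp [pvPadSeq, List.append_assoc]
    omega

theorem take_flatten_rep (m : Nat) : ∀ k, k ≤ 2 * m →
    ((List.replicate m "1110110000010001".toList).flatten).take (8 * k) = pvPadSeq 0 k := by
  induction m with
  | zero =>
    intro k hk
    have : k = 0 := by omega
    simp [this, pvPadSeq]
  | succ m ih =>
    intro k hk
    match k with
    | 0 => simp [pvPadSeq]
    | 1 =>
      rw [List.replicate_succ, List.flatten_cons,
        List.take_append_of_le_length (by decide)]
      decide
    | k + 2 =>
      rw [List.replicate_succ, List.flatten_cons, List.take_append,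
        List.take_of_length_le (by simp; omega)]
      have h16 : 8 * (k + 2) - ("1110110000010001".toList).length = 8 * k := by
        simp; omega
      rw [h16, ih k (by omega)]
      simp [pvPadSeq]


-- proof-only: the bitstring before version selection
def pvBody (cs : List Char) : List Char :=
  "0100".toList ++ pvBin8 cs.length ++ (cs.map (fun c => pvBin8 c.toNat)).flatten ++ "0000".toList

theorem pvBody_length (cs : List Char) : (pvBody cs).length = 16 + 8 * cs.length := by
  unfold pvBody
  rw [List.length_append, List.length_append, List.length_append, flatten_bin8_length,
    pvBin8_length, show ("0100".toList.length) = 4 from by decide,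
    show ("0000".toList.length) = 4 from by decide]
  omega

theorem main_eq (text : String) (hpre : text.toList.length ≤ 80) :
    encode_text_to_bits text = encode_text_to_bits_alt text := by
  have hbits : pvPadAlign ((text.toList.foldl (fun b c => b ++ pvBin8 c.toNat)
      ("0100".toList ++ pvBin8 text.toList.length)) ++ "0000".toList) = pvBody text.toList := by
    have h : (text.toList.foldl (fun b c => b ++ pvBin8 c.toNat)
        ("0100".toList ++ pvBin8 text.toList.length)) ++ "0000".toList = pvBody text.toList := by
      simp [pvBody, List.append_assoc]
    rw [h, padAlign_id _ (by rw [pvBody_length]; omega)]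
  have hrep : (8 - (pvBody text.toList).length % 8) % 8 = 0 := by rw [pvBody_length]; omega
  simp only [encode_text_to_bits, encode_text_to_bits_alt, find_version_and_capacity, hbits,
    fvLoop_eq, pvTable, List.find?]
  have hBbody : "0100".toList ++ pvBin8 text.toList.length ++
      (List.map (fun c => pvBin8 c.toNat) text.toList).flatten ++ "0000".toList
        = pvBody text.toList := rfl
  simp only [hBbody, hrep, List.replicate_zero, List.append_nil]
  have hL := pvBody_length text.toList
  set B := pvBody text.toList with hB
  set n := text.toList.length with hn
  by_cases h1 : n ≤ 17
  · rw [if_pos (by omega : B.length + 56 ≤ 208),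
      decide_eq_true (by omega : 208 / 8 * 8 - 7 * 8 ≥ B.length)]
    norm_num [List.getD]
    rw [show ((152:Int) - (B.length:Int)) = 8 * ((17 - n : Nat) : Int) from by omega,
      show 152 - B.length = 8 * (17 - n) from by omega,
      padLoop_eq _ _ _ (by omega), take_flatten_rep _ _ (by omega)]
    simp
  · by_cases h2 : n ≤ 32
    · rw [if_neg (by omega : ¬ B.length + 56 ≤ 208), if_pos (by omega : B.length + 80 ≤ 352),
        decide_eq_false (by omega : ¬ 208 / 8 * 8 - 7 * 8 ≥ B.length),
        decide_eq_true (by omega : 359 / 8 * 8 - 10 * 8 ≥ B.length)]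
      norm_num [List.getD]
      rw [show ((272:Int) - (B.length:Int)) = 8 * ((32 - n : Nat) : Int) from by omega,
        show 272 - B.length = 8 * (32 - n) from by omega,
        padLoop_eq _ _ _ (by omega), take_flatten_rep _ _ (by omega)]
      simp
    · by_cases h3 : n ≤ 53
      · rw [if_neg (by omega : ¬ B.length + 56 ≤ 208), if_neg (by omega : ¬ B.length + 80 ≤ 352),
          if_pos (by omega : B.length + 120 ≤ 560),
          decide_eq_false (by omega : ¬ 208 / 8 * 8 - 7 * 8 ≥ B.length),
          decide_eq_false (by omega : ¬ 359 / 8 * 8 - 10 * 8 ≥ B.length),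
          decide_eq_true (by omega : 567 / 8 * 8 - 15 * 8 ≥ B.length)]
        norm_num [List.getD]
        rw [show ((440:Int) - (B.length:Int)) = 8 * ((53 - n : Nat) : Int) from by omega,
          show 440 - B.length = 8 * (53 - n) from by omega,
          padLoop_eq _ _ _ (by omega), take_flatten_rep _ _ (by omega)]
        simp
      · rw [if_neg (by omega : ¬ B.length + 56 ≤ 208), if_neg (by omega : ¬ B.length + 80 ≤ 352),
          if_neg (by omega : ¬ B.length + 120 ≤ 560), if_pos (by omega : B.length + 144 ≤ 800),
          decide_eq_false (by omega : ¬ 208 / 8 * 8 - 7 * 8 ≥ B.length),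
          decide_eq_false (by omega : ¬ 359 / 8 * 8 - 10 * 8 ≥ B.length),
          decide_eq_false (by omega : ¬ 567 / 8 * 8 - 15 * 8 ≥ B.length),
          decide_eq_true (by omega : 807 / 8 * 8 - 18 * 8 ≥ B.length)]
        norm_num [List.getD]
        rw [show ((656:Int) - (B.length:Int)) = 8 * ((80 - n : Nat) : Int) from by omega,
          show 656 - B.length = 8 * (80 - n) from by omega,
          padLoop_eq _ _ _ (by omega), take_flatten_rep _ _ (by omega)]
        simp


theorem encode_text_to_bits_spec : Claim_equal_encode_text_to_bits := by
  intro text _ hpre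
  exact main_eq text hpre
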